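-- pv_equiv track=rewrite | github.com/charlesdedampierre/human_rights | wikidata_sparql_scripts/properties/discover_all_properties.py | categorize_property
-- ===== SOURCE A (Python) =====
-- def categorize_property(prop_id, prop_label, datatype=None):
--     """
--     Categorize a property into: date, place, content, identifiers, types, other.
--     Returns list of categories (a property can belong to multiple).
--     """
--     categories = []
--     label_lower = prop_label.lower()
--
--     # Date indicators
--     date_keywords = ["date", "time", "year", "period", "inception", "publication",
--                      "birth", "death", "start", "end", "founded", "established",
--                      "created", "written", "composed", "performed", "released",
--                      "floruit", "earliest", "latest", "century", "era"]
--     if any(kw in label_lower for kw in date_keywords):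
--         categories.append("date")
--     if datatype == "Time":
--         categories.append("date")
--
--     # Place indicators
--     place_keywords = ["country", "place", "location", "city", "region", "territory",
--                       "nationality", "citizenship", "birth", "death", "residence",
--                       "headquarters", "origin", "publication", "jurisdiction",
--                       "administrative", "geographic", "coordinate"]
--     if any(kw in label_lower for kw in place_keywords):
--         categories.append("place")
--     if datatype == "GlobeCoordinate":
--         categories.append("place")
--
--     # Content indicators
--     content_keywords = ["url", "website", "link", "full text", "available at",
--                         "archive", "source", "reference", "described", "image",
--                         "file", "document", "pdf", "text", "wikisource",
--                         "published in", "appears in"]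
--     if any(kw in label_lower for kw in content_keywords):
--         categories.append("content")
--     if datatype == "Url":
--         categories.append("content")
--
--     # Identifier indicators
--     if datatype == "ExternalId":
--         categories.append("identifiers")
--     id_keywords = ["id", "identifier", "number", "code", "isbn", "issn", "doi",
--                    "orcid", "viaf", "gnd", "bnf", "lccn", "oclc"]
--     if any(kw in label_lower for kw in id_keywords):
--         categories.append("identifiers")
--
--     # Type/class indicators
--     type_keywords = ["instance of", "subclass", "type", "class", "genre", "form",
--                      "category", "classification", "kind", "nature", "format",
--                      "movement", "style", "school"]
--     if any(kw in label_lower for kw in type_keywords):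
--         categories.append("types")
--
--     # Language (helps with both date and place inference)
--     if "language" in label_lower or "writing system" in label_lower:
--         categories.append("date")  # Language can help date texts
--         categories.append("place")  # Language indicates origin
--
--     if not categories:
--         categories.append("other")
--
--     return categories
-- ===== SOURCE B (Python) =====
-- DATE_KW = ["date", "time", "year", "period", "inception", "publication",
--            "birth", "death", "start", "end", "founded", "established",
--            "created", "written", "composed", "performed", "released",
--            "floruit", "earliest", "latest", "century", "era"]
-- PLACE_KW = ["country", "place", "location", "city", "region", "territory",
--             "nationality", "citizenship", "birth", "death", "residence",
--             "headquarters", "origin", "publication", "jurisdiction",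
--             "administrative", "geographic", "coordinate"]
-- CONTENT_KW = ["url", "website", "link", "full text", "available at",
--               "archive", "source", "reference", "described", "image",
--               "file", "document", "pdf", "text", "wikisource",
--               "published in", "appears in"]
-- ID_KW = ["id", "identifier", "number", "code", "isbn", "issn", "doi",
--          "orcid", "viaf", "gnd", "bnf", "lccn", "oclc"]
-- TYPE_KW = ["instance of", "subclass", "type", "class", "genre", "form",
--            "category", "classification", "kind", "nature", "format",
--            "movement", "style", "school"]
-- LANG_KW = ["language", "writing system"]
--
-- # the distinct keyword lengths: slices of exactly these lengths are the only candidates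
-- LENS = sorted({len(kw) for kw in DATE_KW + PLACE_KW + CONTENT_KW + ID_KW + TYPE_KW + LANG_KW})
--
--
-- def categorize_property(prop_id, prop_label, datatype=None):
--     """Materialize the set of all substrings of the label whose length is a keyword
--     length, once; every keyword test then becomes a hashed set-membership lookup
--     instead of a substring scan."""
--     label = prop_label.lower()
--     n = len(label)
--     subs = {label[i:i + L] for i in range(n) for L in LENS if i + L <= n}
--     out = []
--     if any(kw in subs for kw in DATE_KW):
--         out.append("date")
--     if datatype == "Time":
--         out.append("date")
--     if any(kw in subs for kw in PLACE_KW):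
--         out.append("place")
--     if datatype == "GlobeCoordinate":
--         out.append("place")
--     if any(kw in subs for kw in CONTENT_KW):
--         out.append("content")
--     if datatype == "Url":
--         out.append("content")
--     if datatype == "ExternalId":
--         out.append("identifiers")
--     if any(kw in subs for kw in ID_KW):
--         out.append("identifiers")
--     if any(kw in subs for kw in TYPE_KW):
--         out.append("types")
--     if any(kw in subs for kw in LANG_KW):
--         out += ["date", "place"]
--     return out or ["other"]
-- ===== Notes on version B (the rewrite author's own statement) =====
-- stated objective: alternative
-- what changed: Instead of A's per-keyword substring scans over the label, B enumerates the label's substrings of keyword lengths once into a hash set, after which every category test is a set-membership lookup rather than a substring search.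
import Mathlib
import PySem

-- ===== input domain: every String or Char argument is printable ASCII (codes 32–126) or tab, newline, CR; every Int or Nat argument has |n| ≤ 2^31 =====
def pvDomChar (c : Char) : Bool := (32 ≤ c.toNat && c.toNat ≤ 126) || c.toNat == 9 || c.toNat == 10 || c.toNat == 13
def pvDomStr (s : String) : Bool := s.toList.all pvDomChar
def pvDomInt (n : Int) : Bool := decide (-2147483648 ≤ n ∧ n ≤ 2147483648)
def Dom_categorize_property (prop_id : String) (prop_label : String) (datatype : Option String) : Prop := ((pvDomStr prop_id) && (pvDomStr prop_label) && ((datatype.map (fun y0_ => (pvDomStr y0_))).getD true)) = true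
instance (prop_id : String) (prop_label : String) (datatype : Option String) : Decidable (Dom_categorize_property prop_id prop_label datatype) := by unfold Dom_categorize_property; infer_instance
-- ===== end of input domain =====

-- B replaces A's per-keyword substring scans by one pass that materializes the set of all
-- label substrings of keyword lengths, testing each keyword by set membership; objective: alternative, same result.


-- ===== PORT A =====
def categorize_property (_prop_id : String) (prop_label : String) (datatype : Option String) : List String :=
  let categories : List String := []
  let label_lower := PySem.Str.lower prop_label
  let date_keywords : List String := ["date", "time", "year", "period", "inception", "publication",
    "birth", "death", "start", "end", "founded", "established",
    "created", "written", "composed", "performed", "released",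
    "floruit", "earliest", "latest", "century", "era"]
  let categories := if date_keywords.any (fun kw => PySem.Str.isIn kw label_lower) then categories ++ ["date"] else categories
  let categories := if datatype == some "Time" then categories ++ ["date"] else categories
  let place_keywords : List String := ["country", "place", "location", "city", "region", "territory",
    "nationality", "citizenship", "birth", "death", "residence",
    "headquarters", "origin", "publication", "jurisdiction",
    "administrative", "geographic", "coordinate"]
  let categories := if place_keywords.any (fun kw => PySem.Str.isIn kw label_lower) then categories ++ ["place"] else categories
  let categories := if datatype == some "GlobeCoordinate" then categories ++ ["place"] else categories
  let content_keywords : List String := ["url", "website", "link", "full text", "available at",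
    "archive", "source", "reference", "described", "image",
    "file", "document", "pdf", "text", "wikisource",
    "published in", "appears in"]
  let categories := if content_keywords.any (fun kw => PySem.Str.isIn kw label_lower) then categories ++ ["content"] else categories
  let categories := if datatype == some "Url" then categories ++ ["content"] else categories
  let categories := if datatype == some "ExternalId" then categories ++ ["identifiers"] else categories
  let id_keywords : List String := ["id", "identifier", "number", "code", "isbn", "issn", "doi",
    "orcid", "viaf", "gnd", "bnf", "lccn", "oclc"]
  let categories := if id_keywords.any (fun kw => PySem.Str.isIn kw label_lower) then categories ++ ["identifiers"] else categories
  let type_keywords : List String := ["instance of", "subclass", "type", "class", "genre", "form",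
    "category", "classification", "kind", "nature", "format",
    "movement", "style", "school"]
  let categories := if type_keywords.any (fun kw => PySem.Str.isIn kw label_lower) then categories ++ ["types"] else categories
  let categories := if PySem.Str.isIn "language" label_lower || PySem.Str.isIn "writing system" label_lower then (categories ++ ["date"]) ++ ["place"] else categories
  let categories := if categories.isEmpty then categories ++ ["other"] else categories
  categories

-- ===== PORT B =====
-- Source B's module-level keyword lists
def cp_date_kw : List String := ["date", "time", "year", "period", "inception", "publication",
  "birth", "death", "start", "end", "founded", "established",
  "created", "written", "composed", "performed", "released",
  "floruit", "earliest", "latest", "century", "era"]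
def cp_place_kw : List String := ["country", "place", "location", "city", "region", "territory",
  "nationality", "citizenship", "birth", "death", "residence",
  "headquarters", "origin", "publication", "jurisdiction",
  "administrative", "geographic", "coordinate"]
def cp_content_kw : List String := ["url", "website", "link", "full text", "available at",
  "archive", "source", "reference", "described", "image",
  "file", "document", "pdf", "text", "wikisource",
  "published in", "appears in"]
def cp_id_kw : List String := ["id", "identifier", "number", "code", "isbn", "issn", "doi",
  "orcid", "viaf", "gnd", "bnf", "lccn", "oclc"]
def cp_type_kw : List String := ["instance of", "subclass", "type", "class", "genre", "form",
  "category", "classification", "kind", "nature", "format",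
  "movement", "style", "school"]
def cp_lang_kw : List String := ["language", "writing system"]

def cp_all_kw : List String := cp_date_kw ++ cp_place_kw ++ cp_content_kw ++ cp_id_kw ++ cp_type_kw ++ cp_lang_kw

-- LENS = sorted({len(kw) for kw in ...})
def cp_lens : List Int := PySem.List.sorted (PySem.Set.ofList (cp_all_kw.map (fun kw => PySem.Str.len kw))) (fun L => L)

-- subs = {label[i:i+L] for i in range(n) for L in LENS if i + L <= n}
def cp_subs (label : String) : PySem.Set String :=
  let n := PySem.Str.len label
  PySem.Set.ofList ((PySem.List.pyRange 0 n 1).flatMap (fun i =>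
    cp_lens.filterMap (fun L =>
      if i + L ≤ n then some (PySem.Str.slice label (some i) (some (i + L))) else none)))

def categorize_property_alt (_prop_id : String) (prop_label : String) (datatype : Option String) : List String :=
  let label := PySem.Str.lower prop_label
  let subs := cp_subs label
  let out : List String := []
  let out := if cp_date_kw.any (fun kw => PySem.Set.contains subs kw) then out ++ ["date"] else out
  let out := if datatype == some "Time" then out ++ ["date"] else out
  let out := if cp_place_kw.any (fun kw => PySem.Set.contains subs kw) then out ++ ["place"] else out
  let out := if datatype == some "GlobeCoordinate" then out ++ ["place"] else out
  let out := if cp_content_kw.any (fun kw => PySem.Set.contains subs kw) then out ++ ["content"] else out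
  let out := if datatype == some "Url" then out ++ ["content"] else out
  let out := if datatype == some "ExternalId" then out ++ ["identifiers"] else out
  let out := if cp_id_kw.any (fun kw => PySem.Set.contains subs kw) then out ++ ["identifiers"] else out
  let out := if cp_type_kw.any (fun kw => PySem.Set.contains subs kw) then out ++ ["types"] else out
  let out := if cp_lang_kw.any (fun kw => PySem.Set.contains subs kw) then out ++ ["date", "place"] else out
  if out.isEmpty then ["other"] else out

-- ===== PRECONDITION & SPEC =====
def Spec_categorize_property (prop_id : String) (prop_label : String) (datatype : Option String) (out : List String) : Prop := out = categorize_property_alt prop_id prop_label datatype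
instance (prop_id : String) (prop_label : String) (datatype : Option String) (out : List String) : Decidable (Spec_categorize_property prop_id prop_label datatype out) := by unfold Spec_categorize_property; infer_instance

-- ===== CLAIM =====
def Claim_equal_categorize_property : Prop := ∀ (prop_id : String) (prop_label : String) (datatype : Option String), Dom_categorize_property prop_id prop_label datatype → Spec_categorize_property prop_id prop_label datatype (categorize_property prop_id prop_label datatype)

-- ===== LEMMAS AND PROOFS =====

-- every list element of cp_lens is a positive length
set_option maxRecDepth 8192 in
theorem pv_lens_pos : ∀ L ∈ cp_lens, (1 : Int) ≤ L := by decide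

-- every keyword is nonempty and its length occurs in cp_lens
set_option maxRecDepth 8192 in
theorem pv_all_kw_fact : ∀ kw ∈ cp_all_kw, kw.toList ≠ [] ∧ PySem.Str.len kw ∈ cp_lens := by decide

-- membership in the substring set coincides with Python's substring test, for keyword-shaped strings
theorem pv_contains_eq (label kw : String) (h1 : kw.toList ≠ []) (h2 : PySem.Str.len kw ∈ cp_lens) :
    PySem.Set.contains (cp_subs label) kw = PySem.Str.isIn kw label := by
  rw [Bool.eq_iff_iff, PySem.Set.contains_iff, PySem.Str.isIn_iff_infix]
  unfold cp_subs
  rw [PySem.Set.mem_ofList]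
  simp only [List.mem_flatMap, List.mem_filterMap]
  constructor
  · rintro ⟨i, hi, L, hL, hif⟩
    rw [PySem.List.mem_pyRange_one] at hi
    by_cases hc : i + L ≤ PySem.Str.len label
    · rw [if_pos hc] at hif
      have hkw := Option.some.inj hif
      have h0L : (1 : Int) ≤ L := pv_lens_pos L hL
      rw [← hkw, PySem.Str.toList_slice, PySem.Chars.slice_eq_listSlice,
        PySem.List.slice_toNat _ hi.1 (by omega)]
      exact ((List.take_prefix _ _).isInfix).trans (List.drop_suffix _ _).isInfix
    · rw [if_neg hc] at hif
      exact absurd hif (by simp)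
  · intro hinf
    obtain ⟨s, t, hst⟩ := hinf
    have hlen : label.toList.length = s.length + kw.toList.length + t.length := by
      rw [← hst]; simp; omega
    have hk : 0 < kw.toList.length := List.length_pos_iff.mpr h1
    have hn : PySem.Str.len label = (label.toList.length : Int) := PySem.Str.len_eq label
    have hkwlen : PySem.Str.len kw = (kw.toList.length : Int) := PySem.Str.len_eq kw
    refine ⟨(s.length : Int), ?_, PySem.Str.len kw, h2, ?_⟩
    · rw [PySem.List.mem_pyRange_one, hn]
      constructor
      · exact_mod_cast Int.natCast_nonneg s.length
      · exact_mod_cast by omega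
    · rw [if_pos (by rw [hn, hkwlen]; exact_mod_cast by omega)]
      refine congrArg some (String.toList_inj.mp ?_)
      rw [PySem.Str.toList_slice, PySem.Chars.slice_eq_listSlice, hkwlen,
        PySem.List.slice_natCast_add, ← hst, List.append_assoc, List.drop_left, List.take_left]

-- lifting pv_contains_eq through `any` over any sublist of the keyword pool
theorem pv_any_eq (label : String) (l : List String) (hsub : ∀ kw ∈ l, kw ∈ cp_all_kw) :
    l.any (fun kw => PySem.Set.contains (cp_subs label) kw) =
    l.any (fun kw => PySem.Str.isIn kw label) := by
  apply PySem.List.any_congr_mem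
  intro kw hkw
  obtain ⟨hne, hlen⟩ := pv_all_kw_fact kw (hsub kw hkw)
  exact pv_contains_eq label kw hne hlen

-- the nine-step append chain shared (after condition rewriting) by both ports
def pvChain (b1 b2 b3 b4 b5 b6 b7 b8 b9 : Bool) : List String :=
  let c1 := if b1 then ([] : List String) ++ ["date"] else []
  let c2 := if b2 then c1 ++ ["date"] else c1
  let c3 := if b3 then c2 ++ ["place"] else c2
  let c4 := if b4 then c3 ++ ["place"] else c3
  let c5 := if b5 then c4 ++ ["content"] else c4
  let c6 := if b6 then c5 ++ ["content"] else c5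
  let c7 := if b7 then c6 ++ ["identifiers"] else c6
  let c8 := if b8 then c7 ++ ["identifiers"] else c7
  if b9 then c8 ++ ["types"] else c8

theorem pvA_eq (pid lab : String) (dt : Option String) :
    categorize_property pid lab dt =
      (let L := pvChain
        (cp_date_kw.any (fun kw => PySem.Str.isIn kw (PySem.Str.lower lab))) (dt == some "Time")
        (cp_place_kw.any (fun kw => PySem.Str.isIn kw (PySem.Str.lower lab))) (dt == some "GlobeCoordinate")
        (cp_content_kw.any (fun kw => PySem.Str.isIn kw (PySem.Str.lower lab))) (dt == some "Url")
        (dt == some "ExternalId")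
        (cp_id_kw.any (fun kw => PySem.Str.isIn kw (PySem.Str.lower lab)))
        (cp_type_kw.any (fun kw => PySem.Str.isIn kw (PySem.Str.lower lab)))
       let L' := if PySem.Str.isIn "language" (PySem.Str.lower lab) || PySem.Str.isIn "writing system" (PySem.Str.lower lab)
                 then (L ++ ["date"]) ++ ["place"] else L
       if L'.isEmpty then L' ++ ["other"] else L') := rfl

theorem pvB_eq (pid lab : String) (dt : Option String) :
    categorize_property_alt pid lab dt =
      (let M := pvChain
        (cp_date_kw.any (fun kw => PySem.Set.contains (cp_subs (PySem.Str.lower lab)) kw)) (dt == some "Time")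
        (cp_place_kw.any (fun kw => PySem.Set.contains (cp_subs (PySem.Str.lower lab)) kw)) (dt == some "GlobeCoordinate")
        (cp_content_kw.any (fun kw => PySem.Set.contains (cp_subs (PySem.Str.lower lab)) kw)) (dt == some "Url")
        (dt == some "ExternalId")
        (cp_id_kw.any (fun kw => PySem.Set.contains (cp_subs (PySem.Str.lower lab)) kw))
        (cp_type_kw.any (fun kw => PySem.Set.contains (cp_subs (PySem.Str.lower lab)) kw))
       let M' := if cp_lang_kw.any (fun kw => PySem.Set.contains (cp_subs (PySem.Str.lower lab)) kw)
                 then M ++ ["date", "place"] else M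
       if M'.isEmpty then ["other"] else M') := rfl

theorem pvTail_eq (c : Bool) (L : List String) :
    (let L' := if c then (L ++ ["date"]) ++ ["place"] else L
     if L'.isEmpty then L' ++ ["other"] else L') =
    (let M' := if c then L ++ ["date", "place"] else L
     if M'.isEmpty then ["other"] else M') := by
  cases c <;> cases L <;> simp

-- ===== VERDICT =====
set_option maxRecDepth 8192 in
theorem categorize_property_spec : Claim_equal_categorize_property := by
  intro prop_id prop_label datatype _
  unfold Spec_categorize_property
  rw [pvA_eq, pvB_eq,
    pv_any_eq (PySem.Str.lower prop_label) cp_date_kw (by decide),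
    pv_any_eq (PySem.Str.lower prop_label) cp_place_kw (by decide),
    pv_any_eq (PySem.Str.lower prop_label) cp_content_kw (by decide),
    pv_any_eq (PySem.Str.lower prop_label) cp_id_kw (by decide),
    pv_any_eq (PySem.Str.lower prop_label) cp_type_kw (by decide)]
  simp only [cp_lang_kw, List.any_cons, List.any_nil, Bool.or_false]
  rw [pv_contains_eq (PySem.Str.lower prop_label) "language" (by decide) (by decide),
    pv_contains_eq (PySem.Str.lower prop_label) "writing system" (by decide) (by decide)]
  exact pvTail_eq _ _
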